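-- pv_equiv track=rewrite | github.com/ChengXunChai/StudentWarGames2023 | Lokami Temple/solution/solve.py | find_longest_paths
-- ===== SOURCE A (Python) =====
-- from collections import defaultdict
--
-- def find_longest_paths(num_doors, connections):
--     graph = defaultdict(list)
--
--     for a, b in connections:
--         graph[a].append(b)
--         graph[b].append(a)
--
--     def dfs(node, visited):
--         visited.add(node)
--         max_path_length = 0
--         for neighbor in graph[node]:
--             if neighbor not in visited:
--                 path_length = dfs(neighbor, visited)
--                 max_path_length = max(max_path_length, path_length)
--         visited.remove(node)
--         return max_path_length + 1
--
--     longest_paths = []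
--
--     for door in range(1, num_doors + 1):
--         path_length = dfs(door, set())
--         longest_paths.append((door, path_length))
--
--     return longest_paths
-- ===== SOURCE B (Python) =====
-- def find_longest_paths(num_doors, connections):
--     def neighbors(node):
--         return [b for a, b in connections if a == node] + \
--                [a for a, b in connections if b == node]
--
--     def longest_from(door):
--         depth = 1
--         frontier = [(door, frozenset([door]))]
--         while True:
--             nxt = [(nbr, vis | {nbr})
--                    for node, vis in frontier
--                    for nbr in neighbors(node)
--                    if nbr not in vis]
--             if not nxt:
--                 return depth
--             depth += 1
--             frontier = nxt
--
--     return [(door, longest_from(door)) for door in range(1, num_doors + 1)]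
-- ===== Notes on version B (the rewrite author's own statement) =====
-- stated objective: alternative
-- what changed: The recursive backtracking DFS (one mutated visited set, returning max child depth + 1) is replaced by a level-by-level breadth-first frontier expansion over (node, immutable visited-set) states with no adjacency dict (neighbors scanned from the connection list) and no recursion: the answer is the number of nonempty frontier levels.
import Mathlib
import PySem

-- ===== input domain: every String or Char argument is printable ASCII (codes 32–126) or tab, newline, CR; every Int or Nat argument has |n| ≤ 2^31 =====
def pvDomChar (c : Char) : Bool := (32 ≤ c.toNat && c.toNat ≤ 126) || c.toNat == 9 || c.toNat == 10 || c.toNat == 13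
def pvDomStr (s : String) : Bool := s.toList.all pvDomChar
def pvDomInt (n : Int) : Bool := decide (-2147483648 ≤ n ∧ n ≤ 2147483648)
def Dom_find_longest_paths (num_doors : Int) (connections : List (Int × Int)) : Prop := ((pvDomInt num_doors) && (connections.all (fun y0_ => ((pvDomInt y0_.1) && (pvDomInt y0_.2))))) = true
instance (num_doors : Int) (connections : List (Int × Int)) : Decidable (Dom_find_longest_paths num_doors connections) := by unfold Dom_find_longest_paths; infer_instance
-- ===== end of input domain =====

-- B replaces the recursive backtracking DFS by a level-by-level frontier expansion over
-- (node, immutable visited-set) states, with neighbors scanned from the connection list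
-- (no adjacency dict, no recursion); an alternative decomposition, similar cost.


-- ===== PORT A =====
-- graph = defaultdict(list); graph[a].append(b); graph[b].append(a)
def pvBuildGraph (connections : List (Int × Int)) : PySem.Dict Int (List Int) :=
  connections.foldl
    (fun g p => (g.modify p.1 [] (· ++ [p.2])).modify p.2 [] (· ++ [p.1]))
    PySem.Dict.empty

-- dfs(node, visited): visited.add(node); max over unvisited neighbours of dfs; restore; +1.
-- The Python set is passed/restored; modelled functionally. Fuel only guards termination
-- (fuel 0 is never reached for the fuel the port supplies).
def pvDfsA (g : PySem.Dict Int (List Int)) : Nat → Int → PySem.Set Int → Int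
  | 0, _, _ => 0
  | f+1, node, visited =>
    let vis := PySem.Set.add visited node
    ((g.getD node []).foldl
      (fun acc nbr => if PySem.Set.contains vis nbr then acc else max acc (pvDfsA g f nbr vis)) 0) + 1

def find_longest_paths (num_doors : Int) (connections : List (Int × Int)) : List (Int × Int) :=
  let graph := pvBuildGraph connections
  (PySem.List.pyRange 1 (num_doors + 1) 1).foldl
    (fun acc door => acc ++ [(door, pvDfsA graph (2 * connections.length + 2) door PySem.Set.empty)]) []

-- ===== PORT B =====
-- neighbors(node) = [b for a,b in connections if a == node] + [a for a,b in connections if b == node]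
def pvNbrs (connections : List (Int × Int)) (node : Int) : List Int :=
  (connections.filter (fun p => p.1 == node)).map (fun p => p.2)
    ++ (connections.filter (fun p => p.2 == node)).map (fun p => p.1)

-- nxt = [(nbr, vis | {nbr}) for node, vis in frontier for nbr in neighbors(node) if nbr not in vis]
def pvStepB (connections : List (Int × Int)) (frontier : List (Int × PySem.Set Int)) :
    List (Int × PySem.Set Int) :=
  frontier.flatMap (fun fr =>
    ((pvNbrs connections fr.1).filter (fun nbr => !(PySem.Set.contains fr.2 nbr))).map
      (fun nbr => (nbr, PySem.Set.add fr.2 nbr)))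

-- while True: nxt = …; if not nxt: return depth; depth += 1; frontier = nxt
-- Fuel only guards termination (the number of levels is bounded, fuel 0 is never reached).
def pvLevelsB (connections : List (Int × Int)) :
    Nat → List (Int × PySem.Set Int) → Int → Int
  | 0, _, depth => depth
  | f+1, frontier, depth =>
    let nxt := pvStepB connections frontier
    if nxt.isEmpty then depth else pvLevelsB connections f nxt (depth + 1)

def find_longest_paths_alt (num_doors : Int) (connections : List (Int × Int)) : List (Int × Int) :=
  (PySem.List.pyRange 1 (num_doors + 1) 1).map
    (fun door => (door,
      pvLevelsB connections (2 * connections.length + 2)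
        [(door, PySem.Set.add PySem.Set.empty door)] 1))

-- ===== PRECONDITION & SPEC =====
def Spec_find_longest_paths (num_doors : Int) (connections : List (Int × Int)) (out : List (Int × Int)) : Prop := out = find_longest_paths_alt num_doors connections
instance (num_doors : Int) (connections : List (Int × Int)) (out : List (Int × Int)) : Decidable (Spec_find_longest_paths num_doors connections out) := by unfold Spec_find_longest_paths; infer_instance

-- ===== CLAIM (what is proved, stated in full; the proofs are below) =====
def Claim_equal_find_longest_paths : Prop := ∀ (num_doors : Int) (connections : List (Int × Int)), Dom_find_longest_paths num_doors connections → Spec_find_longest_paths num_doors connections (find_longest_paths num_doors connections)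

-- ===== LEMMAS AND PROOFS =====

-- the connection list with both orientations of every edge
def pvFlat (c : List (Int × Int)) : List (Int × Int) :=
  c.flatMap (fun p => [(p.1, p.2), (p.2, p.1)])

theorem pvFlat_symm (c : List (Int × Int)) (q : Int × Int) (h : q ∈ pvFlat c) :
    (q.2, q.1) ∈ pvFlat c := by
  simp only [pvFlat, List.mem_flatMap] at h ⊢
  obtain ⟨p, hp, hq⟩ := h
  refine ⟨p, hp, ?_⟩
  simp at hq ⊢
  rcases hq with rfl | rfl <;> simp

theorem pvFlat_len (c : List (Int × Int)) : (pvFlat c).length = 2 * c.length := by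
  induction c with
  | nil => rfl
  | cons p t ih => simp [pvFlat, List.flatMap_cons] at ih ⊢; omega

theorem pvBuild_flat (c : List (Int × Int)) :
    pvBuildGraph c = (pvFlat c).foldl (fun g q => g.modify q.1 [] (· ++ [q.2])) PySem.Dict.empty := by
  have aux : ∀ (l : List (Int × Int)) (d : PySem.Dict Int (List Int)),
      l.foldl (fun g p => (g.modify p.1 [] (· ++ [p.2])).modify p.2 [] (· ++ [p.1])) d
        = (pvFlat l).foldl (fun g q => g.modify q.1 [] (· ++ [q.2])) d := by
    intro l
    induction l with
    | nil => intro d; rfl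
    | cons p t ih => intro d; simp [pvFlat, List.flatMap_cons] at ih ⊢; exact ih _
  exact aux c _

theorem pvAdj_eq (c : List (Int × Int)) (n : Int) :
    (pvBuildGraph c).getD n [] = ((pvFlat c).filter (fun q => q.1 == n)).map (fun q => q.2) := by
  rw [pvBuild_flat]
  have := PySem.Dict.getD_foldl_modify_append (pvFlat c) (PySem.Dict.empty (κ := Int) (ν := List Int)) n
  simpa using this

theorem pvKeys_eq (c : List (Int × Int)) :
    (pvBuildGraph c).keys = PySem.Set.ofList ((pvFlat c).map (fun q => q.1)) := by
  rw [pvBuild_flat]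
  have := PySem.Dict.keys_foldl_modify_key (pvFlat c) (fun q => q.1) ([] : List Int)
      (fun _ q => (· ++ [q.2])) PySem.Dict.empty
  simpa [PySem.Set.ofList_eq_foldl, PySem.Set.update] using this

theorem pvAdj_sub (c : List (Int × Int)) (n x : Int)
    (h : x ∈ (pvBuildGraph c).getD n []) : x ∈ (pvBuildGraph c).keys := by
  rw [pvAdj_eq] at h
  rw [pvKeys_eq]
  simp only [List.mem_map, List.mem_filter] at h
  obtain ⟨q, ⟨hq, _⟩, hx⟩ := h
  have := pvFlat_symm c q hq
  rw [PySem.Set.mem_ofList]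
  exact List.mem_map.2 ⟨(q.2, q.1), this, by simp [hx]⟩

theorem pvKeys_len (c : List (Int × Int)) :
    (pvBuildGraph c).keys.length ≤ 2 * c.length := by
  rw [pvKeys_eq]
  calc (PySem.Set.ofList ((pvFlat c).map (fun q => q.1))).length
      ≤ ((pvFlat c).map (fun q => q.1)).length := PySem.Set.length_ofList_le _
    _ = 2 * c.length := by rw [List.length_map]; exact pvFlat_len c

-- ---------- dfs (port A) lemmas ----------

def pvBound (g : PySem.Dict Int (List Int)) (vis : PySem.Set Int) : Nat :=
  (g.keys.filter (fun x => !(PySem.Set.contains vis x))).length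

theorem pvBound_le (g : PySem.Dict Int (List Int)) (vis : PySem.Set Int) :
    pvBound g vis ≤ g.keys.length := List.length_filter_le _ _

theorem pvContains_eq_decide (vis : PySem.Set Int) (x : Int) :
    PySem.Set.contains vis x = decide (x ∈ vis) := by
  by_cases h : x ∈ vis
  · simp [h]
  · simp only [h, decide_false]
    by_contra hb
    exact h ((PySem.Set.contains_iff vis x).1 (by revert hb; cases PySem.Set.contains vis x <;> simp))

theorem pvBound_lt (g : PySem.Dict Int (List Int)) (vis : PySem.Set Int) (node : Int)
    (hk : node ∈ g.keys) (hn : node ∉ vis) :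
    pvBound g (PySem.Set.add vis node) < pvBound g vis := by
  unfold pvBound
  have hsub : (g.keys.filter (fun x => !(PySem.Set.contains (PySem.Set.add vis node) x))).Sublist
      (g.keys.filter (fun x => !(PySem.Set.contains vis x))) := by
    apply List.monotone_filter_right
    intro a ha
    simp only [pvContains_eq_decide, Bool.not_eq_true', decide_eq_false_iff_not,
      PySem.Set.mem_add] at ha ⊢
    exact fun hm => ha (Or.inl hm)
  have hmem : node ∈ g.keys.filter (fun x => !(PySem.Set.contains vis x)) := by
    simp [List.mem_filter, hk, hn]
  have hnmem : node ∉ g.keys.filter (fun x => !(PySem.Set.contains (PySem.Set.add vis node) x)) := by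
    simp [List.mem_filter, PySem.Set.mem_add]
  have hle := hsub.length_le
  rcases lt_or_eq_of_le hle with h | h
  · exact h
  · exact absurd (hsub.eq_of_length h ▸ hmem) hnmem

theorem pvDfs_congr (g : PySem.Dict Int (List Int)) :
    ∀ (f : Nat) (node : Int) (v1 v2 : PySem.Set Int), (∀ x, x ∈ v1 ↔ x ∈ v2) →
    pvDfsA g f node v1 = pvDfsA g f node v2 := by
  intro f
  induction f with
  | zero => intro node v1 v2 _; rfl
  | succ f ih =>
    intro node v1 v2 hv
    have hv' : ∀ x, x ∈ v1.add node ↔ x ∈ v2.add node := by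
      intro x; simp only [PySem.Set.mem_add]; rw [hv x]
    simp only [pvDfsA]
    congr 1
    apply PySem.List.foldl_congr_mem
    intro acc x _
    rw [show PySem.Set.contains (PySem.Set.add v1 node) x
        = PySem.Set.contains (PySem.Set.add v2 node) x by
      simp only [pvContains_eq_decide]; exact decide_eq_decide.2 (hv' x)]
    rw [ih x (PySem.Set.add v1 node) (PySem.Set.add v2 node) hv']

theorem pvDfs_fuel (g : PySem.Dict Int (List Int)) :
    ∀ (f1 f2 : Nat) (node : Int) (vis : PySem.Set Int), node ∉ vis →
      pvBound g vis < f1 → pvBound g vis < f2 →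
      pvDfsA g f1 node vis = pvDfsA g f2 node vis := by
  intro f1
  induction f1 with
  | zero => intro f2 node vis _ h1 _; omega
  | succ f1 ih =>
    intro f2 node vis hn h1 h2
    obtain ⟨f2', rfl⟩ : ∃ f2', f2 = f2' + 1 := ⟨f2 - 1, by omega⟩
    by_cases hadj : g.getD node [] = []
    · simp [pvDfsA, hadj]
    · have hkey : node ∈ g.keys := by
        by_cases hcn : g.contains node = true
        · exact (PySem.Dict.contains_iff_mem_keys g node).1 hcn
        · refine absurd ?_ hadj
          exact PySem.Dict.getD_of_not_contains (d := g) (k := node) (d0 := ([] : List Int))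
            (by revert hcn; cases g.contains node <;> simp)
      have hblt := pvBound_lt g vis node hkey hn
      simp only [pvDfsA]
      congr 1
      apply PySem.List.foldl_congr_mem
      intro acc x hx
      by_cases hc : PySem.Set.contains (PySem.Set.add vis node) x = true
      · rw [if_pos hc, if_pos hc]
      · have hxm : x ∉ PySem.Set.add vis node := fun hm => hc ((PySem.Set.contains_iff _ x).2 hm)
        rw [if_neg hc, if_neg hc, ih f2' x (PySem.Set.add vis node) hxm (by omega) (by omega)]

theorem pvDfs_le_foldl (l : List Int) (c : Int → Bool) (v : Int → Int) :
    ∀ b : Int, b ≤ l.foldl (fun a x => if c x then a else max a (v x)) b := by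
  induction l with
  | nil => intro b; simp
  | cons x t ih =>
    intro b
    simp only [List.foldl_cons]
    calc b ≤ (if c x then b else max b (v x)) := by split <;> simp
      _ ≤ _ := ih _

theorem pvDfs_pos (g : PySem.Dict Int (List Int)) (f : Nat) (node : Int) (vis : PySem.Set Int) :
    1 ≤ pvDfsA g (f + 1) node vis := by
  simp only [pvDfsA]
  have := pvDfs_le_foldl (g.getD node [])
    (fun nbr => PySem.Set.contains (vis.add node) nbr) (fun nbr => pvDfsA g f nbr (vis.add node)) 0
  omega

-- unfolding of dfs at ample fuel, with the same fuel inside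
theorem pvDfs_unfold (g : PySem.Dict Int (List Int))
    (f : Nat) (node : Int) (vis : PySem.Set Int)
    (hf : g.keys.length < f) :
    pvDfsA g (f + 1) node vis =
      ((g.getD node []).foldl
        (fun acc nbr => if PySem.Set.contains (PySem.Set.add vis node) nbr then acc
          else max acc (pvDfsA g (f + 1) nbr (PySem.Set.add vis node))) 0) + 1 := by
  conv_lhs => rw [show pvDfsA g (f + 1) node vis
    = ((g.getD node []).foldl
        (fun acc nbr => if PySem.Set.contains (PySem.Set.add vis node) nbr then acc
          else max acc (pvDfsA g f nbr (PySem.Set.add vis node))) 0) + 1 from rfl]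
  congr 1
  apply PySem.List.foldl_congr_mem
  intro acc x _
  by_cases hc : PySem.Set.contains (PySem.Set.add vis node) x = true
  · rw [if_pos hc, if_pos hc]
  · have hxm : x ∉ PySem.Set.add vis node := fun hm => hc ((PySem.Set.contains_iff _ x).2 hm)
    rw [if_neg hc, if_neg hc, pvDfs_fuel g f (f + 1) x (PySem.Set.add vis node) hxm
      (by have := pvBound_le g (PySem.Set.add vis node); omega)
      (by have := pvBound_le g (PySem.Set.add vis node); omega)]

-- ---------- score of a frontier state ----------

def pvScore (g : PySem.Dict Int (List Int)) (F : Nat) (fr : Int × PySem.Set Int) : Int :=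
  (fr.2.length : Int) - 1 + pvDfsA g F fr.1 (fr.2.erase fr.1)

def pvWf (g : PySem.Dict Int (List Int)) (d0 : Int) (fr : Int × PySem.Set Int) : Prop :=
  fr.1 ∈ fr.2 ∧ fr.2.Nodup ∧ ∀ x ∈ fr.2, x ∈ g.keys ∨ x = d0

theorem pvAdd_of_not_mem (s : PySem.Set Int) (x : Int) (h : x ∉ s) :
    PySem.Set.add s x = s ++ [x] := by
  unfold PySem.Set.add
  rw [pvContains_eq_decide]
  simp [h]

theorem pvFoldl_max_add (l : List Int) (c : Int → Bool) (v : Int → Int) (k : Int) :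
    ∀ (b m : Int), l.foldl (fun a x => if c x then a else max a (k + v x)) (max b (k + m))
      = max b (k + l.foldl (fun a x => if c x then a else max a (v x)) m) := by
  induction l with
  | nil => intro b m; rfl
  | cons x t ih =>
    intro b m
    simp only [List.foldl_cons]
    by_cases hc : c x = true
    · rw [if_pos hc, if_pos hc]; exact ih b m
    · rw [if_neg hc, if_neg hc,
        show max (max b (k + m)) (k + v x) = max b (k + max m (v x)) by omega]
      exact ih b (max m (v x))

theorem pvWf_len_le (g : PySem.Dict Int (List Int)) (d0 : Int) (s : PySem.Set Int)
    (hnd : s.Nodup) (hel : ∀ x ∈ s, x ∈ g.keys ∨ x = d0) :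
    s.length ≤ g.keys.length + 1 := by
  have hsub : s ⊆ d0 :: g.keys := by
    intro x hx
    rcases hel x hx with h | rfl
    · exact List.mem_cons_of_mem _ h
    · exact List.mem_cons_self
  calc s.length = s.toFinset.card := (List.toFinset_card_of_nodup hnd).symm
    _ ≤ (d0 :: g.keys).toFinset.card := Finset.card_le_card (fun x hx => by
        rw [List.mem_toFinset] at hx ⊢; exact hsub hx)
    _ ≤ (d0 :: g.keys).length := List.toFinset_card_le _
    _ = g.keys.length + 1 := by simp

theorem pvMem_erase_add (s : PySem.Set Int) (node : Int) (hn : node ∈ s) (hnd : s.Nodup) :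
    ∀ y, y ∈ PySem.Set.add (s.erase node) node ↔ y ∈ s := by
  intro y
  rw [PySem.Set.mem_add, hnd.mem_erase_iff]
  constructor
  · rintro (⟨_, h⟩ | rfl)
    · exact h
    · exact hn
  · intro hy
    by_cases hyn : y = node
    · exact Or.inr hyn
    · exact Or.inl ⟨hyn, hy⟩

theorem pvScore_child (g : PySem.Dict Int (List Int)) (F : Nat) (s : PySem.Set Int) (x : Int)
    (hx : x ∉ s) :
    pvScore g F (x, PySem.Set.add s x) = (s.length : Int) + pvDfsA g F x s := by
  unfold pvScore
  simp only
  rw [pvAdd_of_not_mem s x hx, List.erase_append_right _ hx]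
  simp only [List.erase_cons_head, List.append_nil, List.length_append, List.length_cons,
    List.length_nil]
  push_cast
  ring

-- the popped frame's score is the max of its set size and its children's scores
theorem pvScore_pop (g : PySem.Dict Int (List Int))
    (f : Nat) (hf : g.keys.length < f)
    (node : Int) (s : PySem.Set Int) (hn : node ∈ s) (hnd : s.Nodup) :
    pvScore g (f + 1) (node, s) = (s.length : Int) +
      (g.getD node []).foldl
        (fun a x => if PySem.Set.contains s x then a else max a (pvDfsA g (f + 1) x s)) 0 := by
  unfold pvScore
  simp only
  rw [pvDfs_unfold g f node (s.erase node) hf]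
  have hmem := pvMem_erase_add s node hn hnd
  have hfold : (g.getD node []).foldl
      (fun acc nbr => if PySem.Set.contains (PySem.Set.add (s.erase node) node) nbr then acc
        else max acc (pvDfsA g (f + 1) nbr (PySem.Set.add (s.erase node) node))) 0
      = (g.getD node []).foldl
      (fun a x => if PySem.Set.contains s x then a else max a (pvDfsA g (f + 1) x s)) 0 := by
    apply PySem.List.foldl_congr_mem
    intro acc x _
    rw [show PySem.Set.contains (PySem.Set.add (s.erase node) node) x = PySem.Set.contains s x by
      simp only [pvContains_eq_decide]; exact decide_eq_decide.2 (hmem x)]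
    rw [pvDfs_congr g (f + 1) x _ _ hmem]
  rw [hfold]
  have hsl : 1 ≤ s.length := List.length_pos_of_mem hn
  omega

-- ---------- neighbour list of B is a permutation of A's adjacency ----------

theorem pvPerm_aux {α : Type} (X A Y B R : List α) (h : (A ++ B).Perm R) :
    ((X ++ A) ++ (Y ++ B)).Perm (X ++ (Y ++ R)) := by
  have h1 : (X ++ A) ++ (Y ++ B) = X ++ ((A ++ Y) ++ B) := by simp [List.append_assoc]
  rw [h1]
  refine List.Perm.append_left X ?_
  have h2 : ((A ++ Y) ++ B).Perm ((Y ++ A) ++ B) := (List.perm_append_comm).append_right B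
  have h4 : (Y ++ (A ++ B)).Perm (Y ++ R) := List.Perm.append_left Y h
  have h5 : ((Y ++ A) ++ B).Perm (Y ++ R) := by rw [List.append_assoc]; exact h4
  exact h2.trans h5

theorem pvNbrs_perm (c : List (Int × Int)) (n : Int) :
    (pvNbrs c n).Perm ((pvBuildGraph c).getD n []) := by
  rw [pvAdj_eq]
  induction c with
  | nil => simp [pvNbrs, pvFlat]
  | cons p t ih =>
    have hflat : pvFlat (p :: t) = (p.1, p.2) :: (p.2, p.1) :: pvFlat t := by
      simp [pvFlat, List.flatMap_cons]
    rw [hflat]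
    simp only [pvNbrs, List.filter_cons] at ih ⊢
    by_cases h1 : (p.1 == n) = true
    · by_cases h2 : (p.2 == n) = true
      · simp only [h1, h2, if_true, List.map_cons]
        exact pvPerm_aux [p.2] _ [p.1] _ _ ih
      · simp only [h1, h2, if_true, if_false, Bool.false_eq_true, List.map_cons]
        exact pvPerm_aux [p.2] _ [] _ _ ih
    · by_cases h2 : (p.2 == n) = true
      · simp only [h1, h2, if_true, if_false, Bool.false_eq_true, List.map_cons]
        exact pvPerm_aux [] _ [p.1] _ _ ih
      · simp only [h1, h2, if_false, Bool.false_eq_true]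
        exact pvPerm_aux [] _ [] _ _ ih

theorem pvNbrs_mem (c : List (Int × Int)) (n x : Int) :
    x ∈ pvNbrs c n ↔ x ∈ (pvBuildGraph c).getD n [] :=
  (pvNbrs_perm c n).mem_iff

-- ---------- running max over frame scores ----------

def pvSM (g : PySem.Dict Int (List Int)) (F : Nat) (st : List (Int × PySem.Set Int)) (b : Int) : Int :=
  st.foldl (fun b fr => max b (pvScore g F fr)) b

theorem pvSM_ge_base (g : PySem.Dict Int (List Int)) (F : Nat) :
    ∀ (l : List (Int × PySem.Set Int)) (b : Int), b ≤ pvSM g F l b := by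
  intro l
  induction l with
  | nil => intro b; simp [pvSM]
  | cons fr t ih =>
    intro b
    calc b ≤ max b (pvScore g F fr) := le_max_left _ _
      _ ≤ _ := ih _

theorem pvSM_le_congr (g : PySem.Dict Int (List Int)) (F : Nat) :
    ∀ (l : List (Int × PySem.Set Int)) (b b' : Int), l ≠ [] →
      (∀ fr ∈ l, b ≤ pvScore g F fr ∧ b' ≤ pvScore g F fr) →
      pvSM g F l b = pvSM g F l b' := by
  intro l
  match l with
  | [] => intro b b' h _; exact absurd rfl h
  | fr :: t =>
    intro b b' _ hs
    obtain ⟨hb, hb'⟩ := hs fr List.mem_cons_self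
    show pvSM g F t (max b (pvScore g F fr)) = pvSM g F t (max b' (pvScore g F fr))
    rw [max_eq_right hb, max_eq_right hb']

theorem pvSM_const (g : PySem.Dict Int (List Int)) (F : Nat) :
    ∀ (l : List (Int × PySem.Set Int)) (b : Int),
      (∀ fr ∈ l, pvScore g F fr = b) → pvSM g F l b = b := by
  intro l
  induction l with
  | nil => intro b _; rfl
  | cons fr t ih =>
    intro b hs
    show pvSM g F t (max b (pvScore g F fr)) = b
    rw [hs fr List.mem_cons_self, max_self]
    exact ih b (fun fr' h => hs fr' (List.mem_cons_of_mem _ h))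

theorem pvScore_ge (g : PySem.Dict Int (List Int)) (F : Nat) (fr : Int × PySem.Set Int) :
    (fr.2.length : Int) ≤ pvScore g (F + 1) fr := by
  unfold pvScore
  have := pvDfs_pos g F fr.1 (fr.2.erase fr.1)
  omega

-- the scores of one frame's children fold into that frame's score
theorem pvSM_children (c : List (Int × Int)) (F' : Nat)
    (hF : (pvBuildGraph c).keys.length < F')
    (node : Int) (s : PySem.Set Int) (hn : node ∈ s) (hnd : s.Nodup) (b : Int) :
    pvSM (pvBuildGraph c) (F' + 1)
      (((pvNbrs c node).filter (fun x => !(PySem.Set.contains s x))).map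
        (fun x => (x, PySem.Set.add s x)))
      (max b (s.length : Int))
    = max b (pvScore (pvBuildGraph c) (F' + 1) (node, s)) := by
  rw [pvScore_pop (pvBuildGraph c) F' hF node s hn hnd]
  unfold pvSM
  rw [List.foldl_map, List.foldl_filter]
  have hcongr : (pvNbrs c node).foldl
      (fun bb x => if !(PySem.Set.contains s x)
        then max bb (pvScore (pvBuildGraph c) (F' + 1) (x, PySem.Set.add s x)) else bb)
      (max b (s.length : Int))
      = (pvNbrs c node).foldl
      (fun bb x => if PySem.Set.contains s x then bb
        else max bb ((s.length : Int) + pvDfsA (pvBuildGraph c) (F' + 1) x s))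
      (max b (s.length : Int)) := by
    apply PySem.List.foldl_congr_mem
    intro acc x _
    by_cases hc : PySem.Set.contains s x = true
    · rw [if_neg (by rw [hc]; simp), if_pos hc]
    · have hxm : x ∉ s := fun hm => hc ((PySem.Set.contains_iff _ x).2 hm)
      have hcf : PySem.Set.contains s x = false := by
        revert hc; cases PySem.Set.contains s x <;> simp
      rw [if_pos (by rw [hcf]; simp), if_neg hc,
        pvScore_child (pvBuildGraph c) (F' + 1) s x hxm]
  rw [hcongr]
  have hperm := pvNbrs_perm c node
  have hrc : ∀ (bb : Int) (x y : Int),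
      (fun bb x => if PySem.Set.contains s x then bb
        else max bb ((s.length : Int) + pvDfsA (pvBuildGraph c) (F' + 1) x s))
        ((fun bb x => if PySem.Set.contains s x then bb
          else max bb ((s.length : Int) + pvDfsA (pvBuildGraph c) (F' + 1) x s)) bb x) y
      = (fun bb x => if PySem.Set.contains s x then bb
        else max bb ((s.length : Int) + pvDfsA (pvBuildGraph c) (F' + 1) x s))
        ((fun bb x => if PySem.Set.contains s x then bb
          else max bb ((s.length : Int) + pvDfsA (pvBuildGraph c) (F' + 1) x s)) bb y) x := by
    intro bb x y
    simp only
    split_ifs <;> try rfl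
    exact max_right_comm bb _ _
  rw [hperm.foldl_eq' (fun x _ y _ bb => hrc bb x y) (max b (s.length : Int))]
  rw [show max b ((s.length : Int)) = max b ((s.length : Int) + 0) by omega]
  exact pvFoldl_max_add ((pvBuildGraph c).getD node [])
    (fun x => PySem.Set.contains s x) (fun x => pvDfsA (pvBuildGraph c) (F' + 1) x s)
    (s.length : Int) b 0

theorem pvSM_max_out (g : PySem.Dict Int (List Int)) (F : Nat) :
    ∀ (l : List (Int × PySem.Set Int)) (b w : Int),
      pvSM g F l (max b w) = max w (pvSM g F l b) := by
  intro l
  induction l with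
  | nil => intro b w; simp [pvSM, max_comm]
  | cons fr t ih =>
    intro b w
    show pvSM g F t (max (max b w) (pvScore g F fr)) = max w (pvSM g F t (max b (pvScore g F fr)))
    rw [show max (max b w) (pvScore g F fr) = max (max b (pvScore g F fr)) w from max_right_comm _ _ _]
    exact ih _ w

theorem pvSM_append (g : PySem.Dict Int (List Int)) (F : Nat)
    (l1 l2 : List (Int × PySem.Set Int)) (b : Int) :
    pvSM g F (l1 ++ l2) b = pvSM g F l2 (pvSM g F l1 b) := List.foldl_append

-- one frontier expansion preserves the running max of scores
theorem pvSM_step (c : List (Int × Int)) (F' : Nat)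
    (hF : (pvBuildGraph c).keys.length < F') (d0 : Int) :
    ∀ (frontier : List (Int × PySem.Set Int)),
      (∀ fr ∈ frontier, pvWf (pvBuildGraph c) d0 fr) →
      ∀ (dn : Nat), (∀ fr ∈ frontier, fr.2.length = dn) →
      ∀ (b : Int),
      pvSM (pvBuildGraph c) (F' + 1) (pvStepB c frontier) (max b (dn : Int))
        = max b (pvSM (pvBuildGraph c) (F' + 1) frontier (dn : Int)) := by
  intro frontier
  induction frontier with
  | nil => intro _ dn _ b; simp [pvStepB, pvSM]
  | cons fr rest ih =>
    intro hwf dn hd b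
    obtain ⟨hn, hnd, _⟩ := hwf fr List.mem_cons_self
    have hlen : fr.2.length = dn := hd fr List.mem_cons_self
    have hstep : pvStepB c (fr :: rest)
        = ((pvNbrs c fr.1).filter (fun nbr => !(PySem.Set.contains fr.2 nbr))).map
            (fun nbr => (nbr, PySem.Set.add fr.2 nbr)) ++ pvStepB c rest := by
      simp [pvStepB, List.flatMap_cons]
    have hsge : (dn : Int) ≤ pvScore (pvBuildGraph c) (F' + 1) fr := by
      have := pvScore_ge (pvBuildGraph c) F' fr
      omega
    rw [hstep, pvSM_append]
    have hch := pvSM_children c F' hF fr.1 fr.2 hn hnd b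
    rw [show (fr.1, fr.2) = fr from rfl] at hch
    rw [hlen] at hch
    rw [hch]
    have hmb : max b (pvScore (pvBuildGraph c) (F' + 1) fr)
        = max (max b (pvScore (pvBuildGraph c) (F' + 1) fr)) (dn : Int) := by
      have : (dn : Int) ≤ max b (pvScore (pvBuildGraph c) (F' + 1) fr) :=
        le_trans hsge (le_max_right _ _)
      omega
    rw [hmb, ih (fun fr' h => hwf fr' (List.mem_cons_of_mem _ h)) dn
      (fun fr' h => hd fr' (List.mem_cons_of_mem _ h)) _]
    show _ = max b (pvSM (pvBuildGraph c) (F' + 1) rest (max (dn : Int) (pvScore (pvBuildGraph c) (F' + 1) fr)))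
    rw [max_eq_right hsge,
      show pvScore (pvBuildGraph c) (F' + 1) fr
        = max (dn : Int) (pvScore (pvBuildGraph c) (F' + 1) fr) from (max_eq_right hsge).symm,
      pvSM_max_out]
    rw [max_eq_right hsge]
    omega

-- children of a well-formed uniform frontier are well-formed with sets one larger
theorem pvStep_mem (c : List (Int × Int)) (frontier : List (Int × PySem.Set Int))
    (fr : Int × PySem.Set Int) (h : fr ∈ pvStepB c frontier) :
    ∃ p ∈ frontier, ∃ x, x ∈ pvNbrs c p.1 ∧ x ∉ p.2 ∧ fr = (x, PySem.Set.add p.2 x) := by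
  simp only [pvStepB, List.mem_flatMap, List.mem_map, List.mem_filter] at h
  obtain ⟨p, hp, x, ⟨hx, hnc⟩, hfr⟩ := h
  refine ⟨p, hp, x, hx, ?_, hfr.symm⟩
  intro hm
  rw [pvContains_eq_decide] at hnc
  simp [hm] at hnc

theorem pvStep_wf (c : List (Int × Int)) (d0 : Int) (frontier : List (Int × PySem.Set Int))
    (hwf : ∀ fr ∈ frontier, pvWf (pvBuildGraph c) d0 fr) :
    ∀ fr ∈ pvStepB c frontier, pvWf (pvBuildGraph c) d0 fr := by
  intro fr h
  obtain ⟨p, hp, x, hx, hxm, rfl⟩ := pvStep_mem c frontier fr h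
  obtain ⟨_, hnd, hel⟩ := hwf p hp
  refine ⟨by simp [PySem.Set.mem_add], PySem.Set.nodup_add p.2 x hnd, ?_⟩
  intro y hy
  rcases (PySem.Set.mem_add p.2 x y).1 hy with hy | rfl
  · exact hel y hy
  · exact Or.inl (pvAdj_sub c p.1 y ((pvNbrs_mem c p.1 y).1 hx))

theorem pvStep_len (c : List (Int × Int)) (frontier : List (Int × PySem.Set Int)) (dn : Nat)
    (hd : ∀ fr ∈ frontier, fr.2.length = dn) :
    ∀ fr ∈ pvStepB c frontier, fr.2.length = dn + 1 := by
  intro fr h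
  obtain ⟨p, hp, x, _, hxm, rfl⟩ := pvStep_mem c frontier fr h
  simp only
  rw [pvAdd_of_not_mem p.2 x hxm]
  simp [hd p hp]

-- main invariant: the level loop computes the max score of the current frontier
theorem pvLevels_inv (c : List (Int × Int)) (F' : Nat)
    (hF : (pvBuildGraph c).keys.length < F') (d0 : Int) :
    ∀ (f : Nat) (frontier : List (Int × PySem.Set Int)) (dn : Nat),
      frontier ≠ [] →
      (∀ fr ∈ frontier, pvWf (pvBuildGraph c) d0 fr) →
      (∀ fr ∈ frontier, fr.2.length = dn) →
      (pvBuildGraph c).keys.length + 2 ≤ f + dn →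
      pvLevelsB c f frontier (dn : Int) = pvSM (pvBuildGraph c) (F' + 1) frontier (dn : Int) := by
  intro f
  induction f with
  | zero =>
    intro frontier dn hne hwf hd hfuel
    obtain ⟨fr, hfr⟩ := List.exists_mem_of_ne_nil frontier hne
    obtain ⟨_, hnd, hel⟩ := hwf fr hfr
    have := pvWf_len_le (pvBuildGraph c) d0 fr.2 hnd hel
    rw [hd fr hfr] at this
    omega
  | succ f ih =>
    intro frontier dn hne hwf hd hfuel
    simp only [pvLevelsB]
    by_cases hempty : (pvStepB c frontier).isEmpty = true
    · rw [if_pos hempty]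
      have hnil : pvStepB c frontier = [] := List.isEmpty_iff.1 hempty
      -- every frame has all its neighbours visited, so each score equals dn
      refine (pvSM_const (pvBuildGraph c) (F' + 1) frontier (dn : Int) ?_).symm
      intro fr hfr
      obtain ⟨hn, hnd, _⟩ := hwf fr hfr
      have hall : ∀ x ∈ (pvBuildGraph c).getD fr.1 [], PySem.Set.contains fr.2 x = true := by
        intro x hx
        have hxn : x ∈ pvNbrs c fr.1 := (pvNbrs_mem c fr.1 x).2 hx
        by_contra hnc
        have hcf : PySem.Set.contains fr.2 x = false := by
          revert hnc; cases PySem.Set.contains fr.2 x <;> simp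
        have hxm : x ∉ fr.2 := fun hm => by
          rw [(PySem.Set.contains_iff fr.2 x).2 hm] at hcf; cases hcf
        have : (x, PySem.Set.add fr.2 x) ∈ pvStepB c frontier := by
          simp only [pvStepB, List.mem_flatMap]
          exact ⟨fr, hfr, by
            simp only [List.mem_map, List.mem_filter]
            exact ⟨x, ⟨hxn, by simpa using hxm⟩, rfl⟩⟩
        rw [hnil] at this
        exact absurd this (List.not_mem_nil)
      have hpop := pvScore_pop (pvBuildGraph c) F' hF fr.1 fr.2 hn hnd
      rw [show (fr.1, fr.2) = fr from rfl] at hpop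
      have hz : ((pvBuildGraph c).getD fr.1 []).foldl
          (fun a x => if PySem.Set.contains fr.2 x then a
            else max a (pvDfsA (pvBuildGraph c) (F' + 1) x fr.2)) 0 = 0 := by
        have := PySem.List.foldl_congr_mem (l := (pvBuildGraph c).getD fr.1 [])
          (f := fun a x => if PySem.Set.contains fr.2 x then a
            else max a (pvDfsA (pvBuildGraph c) (F' + 1) x fr.2))
          (g := fun a _ => a) (init := (0 : Int))
          (fun acc x hx => by
            show (if PySem.Set.contains fr.2 x = true then acc
              else max acc (pvDfsA (pvBuildGraph c) (F' + 1) x fr.2)) = acc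
            rw [if_pos (hall x hx)])
        rw [this]
        exact List.foldl_fixed _
      rw [hpop, hz, hd fr hfr]
      omega
    · rw [if_neg hempty]
      have hne' : pvStepB c frontier ≠ [] := fun h => hempty (by simp [h])
      have hwf' := pvStep_wf c d0 frontier hwf
      have hd' := pvStep_len c frontier dn hd
      have hih := ih (pvStepB c frontier) (dn + 1) hne' hwf' hd' (by omega)
      rw [show ((dn : Int) + 1) = ((dn + 1 : Nat) : Int) by push_cast; ring, hih]
      -- pvSM nxt (dn+1) = pvSM nxt dn = pvSM frontier dn
      have hge : ∀ fr ∈ pvStepB c frontier,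
          ((dn + 1 : Nat) : Int) ≤ pvScore (pvBuildGraph c) (F' + 1) fr ∧
          (dn : Int) ≤ pvScore (pvBuildGraph c) (F' + 1) fr := by
        intro fr hfr
        have h1 := pvScore_ge (pvBuildGraph c) F' fr
        rw [hd' fr hfr] at h1
        constructor
        · exact_mod_cast h1
        · have : ((dn : Int)) ≤ ((dn + 1 : Nat) : Int) := by push_cast; omega
          calc (dn : Int) ≤ ((dn + 1 : Nat) : Int) := this
            _ ≤ _ := by exact_mod_cast h1
      rw [pvSM_le_congr (pvBuildGraph c) (F' + 1) (pvStepB c frontier)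
        ((dn + 1 : Nat) : Int) (dn : Int) hne' hge]
      have hst := pvSM_step c F' hF d0 frontier hwf dn hd (dn : Int)
      rw [max_self] at hst
      rw [hst]
      exact max_eq_right (pvSM_ge_base (pvBuildGraph c) (F' + 1) frontier (dn : Int))

-- per-door equality
theorem pvPerDoor (c : List (Int × Int)) (door : Int) :
    pvLevelsB c (2 * c.length + 2) [(door, PySem.Set.add PySem.Set.empty door)] 1
      = pvDfsA (pvBuildGraph c) (2 * c.length + 2) door PySem.Set.empty := by
  have hK : (pvBuildGraph c).keys.length ≤ 2 * c.length := pvKeys_len c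
  have hF : (pvBuildGraph c).keys.length < 2 * c.length + 1 := by omega
  have hadd : PySem.Set.add (PySem.Set.empty (α := Int)) door = [door] := rfl
  have hwf : ∀ fr ∈ [(door, ([door] : PySem.Set Int))], pvWf (pvBuildGraph c) door fr := by
    intro fr hfr
    simp only [List.mem_singleton] at hfr
    subst hfr
    exact ⟨by simp, List.nodup_singleton _, fun x hx => by simp at hx; exact Or.inr hx⟩
  have hd : ∀ fr ∈ [(door, ([door] : PySem.Set Int))], fr.2.length = 1 := by
    intro fr hfr; simp only [List.mem_singleton] at hfr; subst hfr; rfl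
  have h := pvLevels_inv c (2 * c.length + 1) hF door (2 * c.length + 2)
    [(door, [door])] 1 (by simp) hwf hd (by omega)
  rw [hadd]
  rw [show ((1 : Nat) : Int) = 1 from rfl] at h
  rw [h]
  simp only [pvSM, List.foldl_cons, List.foldl_nil]
  unfold pvScore
  simp only [List.erase_cons_head, List.length_singleton]
  have hdfseq : pvDfsA (pvBuildGraph c) (2 * c.length + 1 + 1) door ([] : PySem.Set Int)
      = pvDfsA (pvBuildGraph c) (2 * c.length + 2) door PySem.Set.empty := by
    norm_num [PySem.Set.empty]
  have hpos : 1 ≤ pvDfsA (pvBuildGraph c) (2 * c.length + 1 + 1) door ([] : PySem.Set Int) :=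
    pvDfs_pos (pvBuildGraph c) _ door []
  omega

theorem pvFoldl_append_map {α β : Type} (f : α → β) :
    ∀ (l : List α) (acc : List β),
      l.foldl (fun a x => a ++ [f x]) acc = acc ++ l.map f := by
  intro l
  induction l with
  | nil => intro acc; simp
  | cons x t ih => intro acc; simp [ih]

-- ===== VERDICT (by name: the statement is the Claim_ definition above) =====
theorem find_longest_paths_spec : Claim_equal_find_longest_paths := by
  intro num_doors connections _
  unfold Spec_find_longest_paths find_longest_paths find_longest_paths_alt
  simp only
  rw [pvFoldl_append_map _ (PySem.List.pyRange 1 (num_doors + 1) 1) []]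
  simp only [List.nil_append]
  apply List.map_congr_left
  intro door _
  rw [pvPerDoor connections door]
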